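-- pv_equiv track=rewrite | github.com/vasyabigi/topaz | algorithm_prototyping/choice_algorithm.py | vote_ranking
-- ===== SOURCE A (Python) =====
-- from collections import OrderedDict
--
-- def vote_ranking(choices, answers):
--     """
--         In this variant, every user must level-rank all choices.
--     """
--     final_ranking = {}
--     for choice in choices:
--         final_ranking[choice] = 0
--         for user, answer in answers.items():
--             for i, choice_set in enumerate(answer):
--                 if choice in choice_set:
--                     better_part = answer[:i]
--                     num_of_losses = 0
--                     for s in better_part:
--                         num_of_losses += len(s)
--                     final_ranking[choice] += num_of_losses
--     final_ranking = OrderedDict(sorted(final_ranking.items(),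
--                                 key=lambda t: t[1]))
--     return final_ranking
-- ===== SOURCE B (Python) =====
-- from collections import OrderedDict
--
-- def vote_ranking(choices, answers):
--     # One pass over the answers with a running prefix-sum of level sizes,
--     # accumulating each choice's losses in a dict; then rank the choices.
--     scores = {}
--     for answer in answers.values():
--         losses = 0
--         for choice_set in answer:
--             for c in dict.fromkeys(choice_set):
--                 scores[c] = scores.get(c, 0) + losses
--             losses += len(choice_set)
--     ranking = [(c, scores.get(c, 0)) for c in dict.fromkeys(choices)]
--     return OrderedDict(sorted(ranking, key=lambda t: t[1]))
-- ===== Notes on version B (the rewrite author's own statement) =====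
-- stated objective: faster
-- what changed: Instead of rescanning all answers and re-summing level sizes for every choice (and every level's whole prefix), B makes one pass over each answer keeping a running prefix-sum of level sizes and accumulates each choice's losses in a dict, then ranks the requested choices by lookup.
import Mathlib
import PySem

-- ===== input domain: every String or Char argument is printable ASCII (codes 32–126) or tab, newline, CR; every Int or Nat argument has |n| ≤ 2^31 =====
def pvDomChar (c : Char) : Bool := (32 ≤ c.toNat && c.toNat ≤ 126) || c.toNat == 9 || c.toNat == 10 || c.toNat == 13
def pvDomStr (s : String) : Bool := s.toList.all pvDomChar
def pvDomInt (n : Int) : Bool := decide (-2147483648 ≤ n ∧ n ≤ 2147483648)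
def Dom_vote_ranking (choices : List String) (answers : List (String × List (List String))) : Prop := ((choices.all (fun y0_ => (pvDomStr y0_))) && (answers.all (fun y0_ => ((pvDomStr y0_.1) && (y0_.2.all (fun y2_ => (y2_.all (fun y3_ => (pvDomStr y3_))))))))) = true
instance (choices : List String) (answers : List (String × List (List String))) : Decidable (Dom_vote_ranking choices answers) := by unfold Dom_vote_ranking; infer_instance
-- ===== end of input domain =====

-- B replaces A's per-choice rescans by one pass over the answers with a running
-- prefix-sum of level sizes, accumulating each choice's losses in a dict.

-- ===== PORT A =====
def vote_ranking (choices : List String) (answers : List (String × List (List String))) : List (String × Int) :=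
  let ad := PySem.Dict.ofList answers
  let final_ranking : PySem.Dict String Int :=
    choices.foldl (fun fr choice =>
      ad.items.foldl (fun fr ua =>
        (PySem.List.enumerate ua.2 0).foldl (fun fr ics =>
          if choice ∈ ics.2 then
            let better_part := PySem.List.slice ua.2 none (some ics.1)
            let num_of_losses := better_part.foldl (fun acc s => acc + (s.length : Int)) 0
            fr.insert choice (fr.getD choice 0 + num_of_losses)
          else fr) fr) (fr.insert choice 0)) PySem.Dict.empty
  PySem.List.sorted final_ranking.items (fun t => t.2) false

-- ===== PORT B =====
def vote_ranking_alt (choices : List String) (answers : List (String × List (List String))) : List (String × Int) :=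
  let ad := PySem.Dict.ofList answers
  let scores : PySem.Dict String Int :=
    ad.values.foldl (fun sc answer =>
      (answer.foldl (fun (p : PySem.Dict String Int × Int) choice_set =>
        ((PySem.List.dedup choice_set).foldl
            (fun sc c => sc.insert c (sc.getD c 0 + p.2)) p.1,
         p.2 + (choice_set.length : Int))) (sc, 0)).1) PySem.Dict.empty
  let ranking := (PySem.List.dedup choices).map (fun c => (c, scores.getD c 0))
  PySem.List.sorted ranking (fun t => t.2) false

-- ===== PRECONDITION & SPEC =====
def Spec_vote_ranking (choices : List String) (answers : List (String × List (List String))) (out : List (String × Int)) : Prop := out = vote_ranking_alt choices answers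
instance (choices : List String) (answers : List (String × List (List String))) (out : List (String × Int)) : Decidable (Spec_vote_ranking choices answers out) := by unfold Spec_vote_ranking; infer_instance

-- ===== CLAIM (what is proved, stated in full; the proofs are below) =====
def Claim_equal_vote_ranking : Prop := ∀ (choices : List String) (answers : List (String × List (List String))), Dom_vote_ranking choices answers → Spec_vote_ranking choices answers (vote_ranking choices answers)

-- ===== LEMMAS AND PROOFS =====

def pvSumLen (l : List (List String)) : Int := (l.map (fun s => (s.length : Int))).sum

def pvAnsGo (ans : List (List String)) (losses : Int) (c : String) : Int :=
  match ans with
  | [] => 0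
  | cs :: rest => (if c ∈ cs then losses else 0) + pvAnsGo rest (losses + (cs.length : Int)) c

def pvScore (anss : List (List (List String))) (c : String) : Int :=
  (anss.map (fun a => pvAnsGo a 0 c)).sum

-- B side
theorem pvB1 (l : List String) (hn : l.Nodup) (L : Int) (sc : PySem.Dict String Int) (x : String) :
    (l.foldl (fun sc c => sc.insert c (sc.getD c 0 + L)) sc).getD x 0
      = sc.getD x 0 + (if x ∈ l then L else 0) := by
  induction l generalizing sc with
  | nil => simp
  | cons c rest ih =>
    simp only [List.foldl_cons]
    rcases List.nodup_cons.mp hn with ⟨hc, hrest⟩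
    rw [ih hrest]
    by_cases hx : x = c
    · subst hx
      have : x ∉ rest := hc
      simp [this, PySem.Dict.getD_insert_self]
    · rw [PySem.Dict.getD_insert_of_ne (hne := hx)]
      simp [List.mem_cons, hx]

theorem pvB2 (ans : List (List String)) (l0 : Int) (sc : PySem.Dict String Int) (x : String) :
    ((ans.foldl (fun (p : PySem.Dict String Int × Int) cs =>
        ((PySem.List.dedup cs).foldl (fun sc c => sc.insert c (sc.getD c 0 + p.2)) p.1,
         p.2 + (cs.length : Int))) (sc, l0)).1).getD x 0
      = sc.getD x 0 + pvAnsGo ans l0 x := by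
  induction ans generalizing sc l0 with
  | nil => simp [pvAnsGo]
  | cons cs rest ih =>
    simp only [List.foldl_cons]
    rw [ih]
    rw [pvB1 _ (PySem.List.nodup_dedup cs) l0 sc x]
    simp [pvAnsGo]
    ring

theorem pvB3 (anss : List (List (List String))) (sc : PySem.Dict String Int) (x : String) :
    (anss.foldl (fun sc answer =>
      (answer.foldl (fun (p : PySem.Dict String Int × Int) cs =>
        ((PySem.List.dedup cs).foldl (fun sc c => sc.insert c (sc.getD c 0 + p.2)) p.1,
         p.2 + (cs.length : Int))) (sc, 0)).1) sc).getD x 0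
      = sc.getD x 0 + pvScore anss x := by
  induction anss generalizing sc with
  | nil => simp [pvScore]
  | cons a rest ih =>
    simp only [List.foldl_cons]
    rw [ih, pvB2]
    simp [pvScore]
    ring

-- A side
def pvStepE (c : String) (full : List (List String)) (fr : PySem.Dict String Int) (ics : Int × List String) : PySem.Dict String Int :=
  if c ∈ ics.2 then
    fr.insert c (fr.getD c 0 + (PySem.List.slice full none (some ics.1)).foldl (fun acc s => acc + (s.length : Int)) 0)
  else fr

theorem pvSumLen_append (l : List (List String)) (cs : List String) :
    pvSumLen (l ++ [cs]) = pvSumLen l + (cs.length : Int) := by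
  simp [pvSumLen]

theorem pvA2 (c : String) (full : List (List String)) (rest : List (List String)) :
    ∀ (k : Nat), full.drop k = rest → ∀ (fr : PySem.Dict String Int) (x : String),
    ((PySem.List.enumerate rest (k : Int)).foldl (pvStepE c full) fr).getD x 0
      = fr.getD x 0 + (if x = c then pvAnsGo rest (pvSumLen (full.take k)) c else 0) := by
  induction rest with
  | nil => intro k hk fr x; simp [PySem.List.enumerate, pvAnsGo]
  | cons cs rest' ih =>
    intro k hk fr x
    have hget : full[k]? = some cs := by
      rw [← List.head?_drop, hk]; rfl
    have hdrop : full.drop (k + 1) = rest' := by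
      have h1 : full.drop (k + 1) = (full.drop k).drop 1 := by
        rw [List.drop_drop]
      rw [h1, hk]; rfl
    have htake : full.take (k + 1) = full.take k ++ [cs] := by
      rw [List.take_add_one, hget]; rfl
    rw [PySem.List.enumerate_cons, List.foldl_cons]
    have hcast : (k : Int) + 1 = ((k + 1 : Nat) : Int) := by push_cast; ring
    rw [hcast]
    by_cases hmem : c ∈ cs
    · have hstep : pvStepE c full fr ((k : Int), cs)
          = fr.insert c (fr.getD c 0 + pvSumLen (full.take k)) := by
        simp only [pvStepE, if_pos hmem, PySem.List.slice_to_natCast,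
          PySem.List.foldl_add, pvSumLen]
        simp
      rw [hstep, ih (k + 1) hdrop]
      rw [htake, pvSumLen_append]
      by_cases hx : x = c
      · subst hx
        rw [PySem.Dict.getD_insert_self]
        simp [pvAnsGo, hmem]
        ring
      · rw [PySem.Dict.getD_insert_of_ne (hne := hx)]
        simp [hx]
    · have hstep : pvStepE c full fr ((k : Int), cs) = fr := by
        simp [pvStepE, hmem]
      rw [hstep, ih (k + 1) hdrop]
      rw [htake, pvSumLen_append]
      simp [pvAnsGo, hmem]

theorem pvKeysInsertAdd (d : PySem.Dict String Int) (k : String) (v : Int) :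
    (d.insert k v).keys = PySem.Set.add d.keys k := by
  rw [PySem.Set.add_eq_ite]
  by_cases h : k ∈ d.keys
  · rw [if_pos h, PySem.Dict.keys_insert_of_contains]
    rw [PySem.Dict.contains_iff_mem_keys]; exact h
  · rw [if_neg h, PySem.Dict.keys_insert_of_not_contains]
    simp only [← Bool.not_eq_true, PySem.Dict.contains_iff_mem_keys]
    simpa using h

theorem pvA3 (c : String) (full : List (List String)) (es : List (Int × List String)) :
    ∀ (fr : PySem.Dict String Int), c ∈ fr.keys → (es.foldl (pvStepE c full) fr).keys = fr.keys := by
  induction es with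
  | nil => intro fr _; rfl
  | cons e rest ih =>
    intro fr hc
    rw [List.foldl_cons]
    by_cases hmem : c ∈ e.2
    · have hstep : pvStepE c full fr e
          = fr.insert c (fr.getD c 0 + (PySem.List.slice full none (some e.1)).foldl (fun acc s => acc + (s.length : Int)) 0) := by
        simp [pvStepE, hmem]
      rw [hstep, ih _ (by rw [PySem.Dict.mem_keys_insert]; left; rfl),
        pvKeysInsertAdd, PySem.Set.add_of_mem hc]
    · have hstep : pvStepE c full fr e = fr := by simp [pvStepE, hmem]
      rw [hstep, ih _ hc]

def pvUaStep (c : String) (fr : PySem.Dict String Int) (ua : String × List (List String)) : PySem.Dict String Int :=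
  (PySem.List.enumerate ua.2 0).foldl (pvStepE c ua.2) fr

theorem pvA4 (c : String) (items : List (String × List (List String))) :
    ∀ (fr : PySem.Dict String Int) (x : String),
    (items.foldl (pvUaStep c) fr).getD x 0
      = fr.getD x 0 + (if x = c then pvScore (items.map (fun ua => ua.2)) c else 0) := by
  induction items with
  | nil => intro fr x; simp [pvScore]
  | cons ua rest ih =>
    intro fr x
    rw [List.foldl_cons, ih]
    have h2 : (pvUaStep c fr ua).getD x 0
        = fr.getD x 0 + (if x = c then pvAnsGo ua.2 0 c else 0) := by
      have := pvA2 c ua.2 ua.2 0 (by simp) fr x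
      simpa [pvUaStep, pvSumLen] using this
    rw [h2]
    by_cases hx : x = c <;> simp [hx, pvScore] <;> try ring

theorem pvA4k (c : String) (items : List (String × List (List String))) :
    ∀ (fr : PySem.Dict String Int), c ∈ fr.keys → (items.foldl (pvUaStep c) fr).keys = fr.keys := by
  induction items with
  | nil => intro fr _; rfl
  | cons ua rest ih =>
    intro fr hc
    rw [List.foldl_cons]
    have hk : (pvUaStep c fr ua).keys = fr.keys := pvA3 c ua.2 _ fr hc
    rw [ih _ (by rw [hk]; exact hc), hk]

theorem pvA5k (items : List (String × List (List String))) (choices : List String) :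
    ∀ (fr : PySem.Dict String Int),
    (choices.foldl (fun fr choice => items.foldl (pvUaStep choice) (fr.insert choice 0)) fr).keys
      = PySem.Set.update fr.keys choices := by
  induction choices with
  | nil => intro fr; simp [PySem.Set.update]
  | cons choice rest ih =>
    intro fr
    rw [List.foldl_cons, ih, PySem.Set.update_cons]
    have h1 : (items.foldl (pvUaStep choice) (fr.insert choice 0)).keys = (fr.insert choice 0).keys :=
      pvA4k choice items _ (by rw [PySem.Dict.mem_keys_insert]; left; rfl)
    rw [h1, pvKeysInsertAdd]

theorem pvA5g (items : List (String × List (List String))) (choices : List String) :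
    ∀ (fr : PySem.Dict String Int) (x : String),
    (choices.foldl (fun fr choice => items.foldl (pvUaStep choice) (fr.insert choice 0)) fr).getD x 0
      = if x ∈ choices then pvScore (items.map (fun ua => ua.2)) x else fr.getD x 0 := by
  induction choices with
  | nil => intro fr x; simp
  | cons choice rest ih =>
    intro fr x
    rw [List.foldl_cons, ih]
    by_cases hr : x ∈ rest
    · simp [hr]
    · rw [if_neg hr, pvA4]
      by_cases hx : x = choice
      · subst hx
        simp [PySem.Dict.getD_insert_self]
      · rw [PySem.Dict.getD_insert_of_ne (hne := hx)]
        simp [List.mem_cons, hx, hr]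


theorem pv_main (choices : List String) (answers : List (String × List (List String))) :
    vote_ranking choices answers = vote_ranking_alt choices answers := by
  have hA : vote_ranking choices answers
      = PySem.List.sorted
          ((choices.foldl
            (fun fr choice => (PySem.Dict.ofList answers).items.foldl (pvUaStep choice) (fr.insert choice 0))
            PySem.Dict.empty).items) (fun t => t.2) false := rfl
  have hB : vote_ranking_alt choices answers
      = PySem.List.sorted
          ((PySem.List.dedup choices).map (fun c =>
            (c, ((PySem.Dict.ofList answers).values.foldl (fun sc answer =>
              (answer.foldl (fun (p : PySem.Dict String Int × Int) choice_set =>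
                ((PySem.List.dedup choice_set).foldl
                    (fun sc c => sc.insert c (sc.getD c 0 + p.2)) p.1,
                 p.2 + (choice_set.length : Int))) (sc, 0)).1) PySem.Dict.empty).getD c 0)))
          (fun t => t.2) false := rfl
  rw [hA, hB]
  set ad := PySem.Dict.ofList answers with had
  set frA := choices.foldl
      (fun fr choice => ad.items.foldl (pvUaStep choice) (fr.insert choice 0))
      PySem.Dict.empty with hfrA
  have hkeys : frA.keys = PySem.List.dedup choices := by
    rw [hfrA, pvA5k]
    simp only [PySem.Dict.keys_empty]
    rw [PySem.Set.update_nil_left, PySem.List.dedup_eq_ofList]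
  have hnodup : frA.keys.Nodup := by
    rw [hkeys]; exact PySem.List.nodup_dedup choices
  have hvals : ad.values = ad.items.map (fun ua => ua.2) := rfl
  have hitems : frA.items = (PySem.List.dedup choices).map
      (fun c => (c, pvScore (ad.items.map (fun ua => ua.2)) c)) := by
    rw [PySem.Dict.items_eq_map_keys frA hnodup 0, hkeys]
    apply List.map_congr_left
    intro c hc
    have hcm : c ∈ choices := (PySem.List.mem_dedup _ _).mp hc
    rw [hfrA, pvA5g]
    simp [hcm]
  rw [hitems]
  congr 1
  apply List.map_congr_left
  intro c _
  rw [pvB3, hvals]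
  simp

-- ===== VERDICT (by name: the statement is the Claim_ definition above) =====
theorem vote_ranking_spec : Claim_equal_vote_ranking := by
  intro choices answers _
  simp only [Spec_vote_ranking]
  exact pv_main choices answers
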